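-- pv_equiv track=rewrite | github.com/UrielCuriel/pydoc-markdown-nuxt | src/pydoc_markdown_nuxt/utils.py | generate_api_breadcrumbs
-- ===== SOURCE A (Python) =====
-- from typing import Any, Dict, List, Optional
--
-- def generate_api_breadcrumbs(module_path: str, base_url: str = "/docs") -> List[Dict[str, str]]:
--     """
--     Generate breadcrumb navigation for API documentation.
--
--     Args:
--         module_path (str): Full module path (e.g., ``"mypackage.core.DataProcessor"``).
--         base_url (str): Base URL for the documentation.
--
--     Returns:
--         List[Dict[str, str]]: List of breadcrumb items.
--     """
--     breadcrumbs = []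
--
--     parts = module_path.split(".")
--     current_path = base_url
--
--     for i, part in enumerate(parts):
--         current_path += f"/{part}"
--
--         if i == len(parts) - 1:
--             # Last item (current page) - no link
--             breadcrumbs.append({"title": part})
--         else:
--             breadcrumbs.append({"title": part, "to": current_path})
--
--     return breadcrumbs
-- ===== SOURCE B (Python) =====
-- def generate_api_breadcrumbs(module_path, base_url="/docs"):
--     # Prefix-table decomposition: compute all cumulative URLs up front,
--     # then assemble linked entries (all but last) and the plain last entry.
--     parts = module_path.split(".")
--     urls = [base_url + "/" + "/".join(parts[: i + 1]) for i in range(len(parts))]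
--     links = [{"title": p, "to": u} for p, u in zip(parts[:-1], urls)]
--     return links + [{"title": parts[-1]}]
-- ===== Notes on version B (the rewrite author's own statement) =====
-- stated objective: alternative
-- what changed: Replaces A's single loop with a running-accumulator string and an i==len-1 branch by a prefix-table decomposition: all cumulative URLs are computed first via joins of path prefixes, then the result is assembled as zip(parts[:-1], urls) for linked entries plus one separate title-only entry for the last part.
import Mathlib
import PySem

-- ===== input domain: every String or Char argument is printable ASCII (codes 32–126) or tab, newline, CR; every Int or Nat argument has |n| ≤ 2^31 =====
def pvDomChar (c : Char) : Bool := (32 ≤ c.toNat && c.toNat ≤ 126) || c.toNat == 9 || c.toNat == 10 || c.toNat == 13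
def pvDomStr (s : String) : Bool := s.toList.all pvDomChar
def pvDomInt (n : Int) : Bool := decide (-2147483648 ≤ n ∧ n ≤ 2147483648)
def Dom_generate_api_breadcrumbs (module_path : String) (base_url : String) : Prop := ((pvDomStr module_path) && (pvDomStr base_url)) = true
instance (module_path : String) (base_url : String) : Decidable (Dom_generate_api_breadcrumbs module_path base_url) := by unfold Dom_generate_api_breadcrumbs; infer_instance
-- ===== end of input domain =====

-- B builds a prefix table of cumulative URLs and zips it with the parts, instead of A's
-- running-accumulator loop with an i == len-1 branch; return values are proved equal.

-- ===== PORT A =====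
-- module_path.split(".") — the separator "." is non-empty, so split? always returns some;
-- the .getD [] default is unreachable.
def generate_api_breadcrumbs (module_path : String) (base_url : String) : List (List (String × String)) :=
  let parts := (PySem.Str.split? module_path ".").getD []
  ((PySem.List.enumerate parts 0).foldl
    (fun (st : List (List (String × String)) × String) (pr : Int × String) =>
      if pr.1 == (parts.length : Int) - 1 then
        (st.1 ++ [[("title", pr.2)]], st.2 ++ "/" ++ pr.2)
      else
        (st.1 ++ [[("title", pr.2), ("to", st.2 ++ "/" ++ pr.2)]], st.2 ++ "/" ++ pr.2))
    (([] : List (List (String × String))), base_url)).1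

-- ===== PORT B =====
-- parts[-1] — parts is never empty (split of a non-empty separator), so the "" default is unreachable.
def generate_api_breadcrumbs_alt (module_path : String) (base_url : String) : List (List (String × String)) :=
  let parts := (PySem.Str.split? module_path ".").getD []
  let urls := (PySem.List.pyRange 0 (parts.length : Int)).map
    (fun i => base_url ++ "/" ++ PySem.Str.join "/" (PySem.List.slice parts none (some (i + 1))))
  (List.zip (PySem.List.slice parts none (some (-1))) urls).map
    (fun pu => [("title", pu.1), ("to", pu.2)]) ++
  [[("title", PySem.List.pyGetD parts (-1) "")]]

-- ===== PRECONDITION & SPEC =====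
def Spec_generate_api_breadcrumbs (module_path : String) (base_url : String) (out : List (List (String × String))) : Prop := out = generate_api_breadcrumbs_alt module_path base_url
instance (module_path : String) (base_url : String) (out : List (List (String × String))) : Decidable (Spec_generate_api_breadcrumbs module_path base_url out) := by unfold Spec_generate_api_breadcrumbs; infer_instance

-- ===== CLAIM (what is proved, stated in full; the proofs are below) =====
def Claim_equal_generate_api_breadcrumbs : Prop := ∀ (module_path : String) (base_url : String), Dom_generate_api_breadcrumbs module_path base_url → Spec_generate_api_breadcrumbs module_path base_url (generate_api_breadcrumbs module_path base_url)

-- ===== LEMMAS AND PROOFS =====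

-- The common shape both ports compute: one linked entry per non-final part, then the bare title.
def pvCrumbs : List String → String → List (List (String × String))
  | [], _ => []
  | [p], _ => [[("title", p)]]
  | p :: q :: rest, cur =>
      [("title", p), ("to", cur ++ "/" ++ p)] :: pvCrumbs (q :: rest) (cur ++ "/" ++ p)

theorem pv_go_ne_nil (sep : List Char) : ∀ (fuel : Nat) (l cur : List Char) (acc : List (List Char)),
    PySem.Chars.splitOn.go sep fuel l cur acc ≠ [] := by
  intro fuel
  induction fuel with
  | zero =>
      intro l cur acc
      rw [PySem.Chars.splitOn.go.eq_def]
      simp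
  | succ n ih =>
      intro l cur acc
      rw [PySem.Chars.splitOn.go.eq_def]
      cases l with
      | nil => simp
      | cons c rest =>
          dsimp only
          split_ifs
          · exact ih _ _ _
          · exact ih _ _ _

theorem pv_parts_ne_nil (s : String) : (PySem.Str.split? s ".").getD [] ≠ [] := by
  have h := PySem.Str.split?_map s "."
  cases hs : PySem.Str.split? s "." with
  | none =>
      rw [hs] at h
      simp [PySem.Chars.split?] at h
  | some ps =>
      rw [hs] at h
      simp [PySem.Chars.split?, PySem.Chars.splitOn] at h
      intro hnil
      simp only [Option.getD_some] at hnil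
      apply pv_go_ne_nil ['.'] (s.length + 1) s.toList [] []
      rw [← h, hnil]
      simp

theorem pv_join_singleton (p : String) : PySem.Str.join "/" [p] = p := by
  rw [← String.toList_inj]
  simp [PySem.Chars.join_singleton]

theorem pv_join_cons (p q : String) (zs : List String) :
    PySem.Str.join "/" (p :: q :: zs) = p ++ "/" ++ PySem.Str.join "/" (q :: zs) := by
  rw [← String.toList_inj]
  simp [PySem.Chars.join_cons_cons]

theorem pv_foldA (n : Int) : ∀ (l : List String) (s : Int)
    (acc : List (List (String × String))) (cur : String), s + l.length = n →
    ((PySem.List.enumerate l s).foldl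
      (fun (st : List (List (String × String)) × String) (pr : Int × String) =>
        if pr.1 == n - 1 then
          (st.1 ++ [[("title", pr.2)]], st.2 ++ "/" ++ pr.2)
        else
          (st.1 ++ [[("title", pr.2), ("to", st.2 ++ "/" ++ pr.2)]], st.2 ++ "/" ++ pr.2))
      (acc, cur)).1 = acc ++ pvCrumbs l cur := by
  intro l
  induction l with
  | nil => intro s acc cur _; simp [PySem.List.enumerate_nil, pvCrumbs]
  | cons p l ih =>
      intro s acc cur hs
      rw [PySem.List.enumerate_cons, List.foldl_cons]
      cases l with
      | nil =>
          have hc : (s == n - 1) = true := by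
            simp only [List.length_cons, List.length_nil] at hs
            simp [beq_iff_eq]; omega
          simp only [hc, if_true]
          simp [PySem.List.enumerate_nil, pvCrumbs]
      | cons q rest =>
          have hc : (s == n - 1) = false := by
            simp only [List.length_cons] at hs
            simp; push_cast at hs ⊢; omega
          simp only [hc, Bool.false_eq_true, if_false]
          rw [ih (s + 1) _ _ (by simp only [List.length_cons] at hs ⊢; push_cast at hs ⊢; omega)]
          simp [pvCrumbs, List.append_assoc]

theorem pv_B : ∀ (parts : List String) (cur : String) (h : parts ≠ []),
    (List.zip parts.dropLast
        ((List.range parts.length).map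
          (fun k => cur ++ "/" ++ PySem.Str.join "/" (parts.take (k + 1))))).map
      (fun pu => [("title", pu.1), ("to", pu.2)]) ++
    [[("title", parts.getLast h)]] = pvCrumbs parts cur := by
  intro parts
  induction parts with
  | nil => intro _ h; exact absurd rfl h
  | cons p l ih =>
      intro cur _
      cases l with
      | nil => simp [pvCrumbs]
      | cons q rest =>
          have hl : q :: rest ≠ [] := by simp
          rw [List.length_cons, List.range_succ_eq_map]
          rw [List.map_cons, List.map_map]
          rw [List.dropLast_cons₂, List.zip_cons_cons, List.map_cons]
          have hhead : cur ++ "/" ++ PySem.Str.join "/" ((p :: q :: rest).take (0 + 1)) = cur ++ "/" ++ p := by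
            simp [pv_join_singleton]
          rw [hhead]
          have htail : ∀ k : Nat,
              cur ++ "/" ++ PySem.Str.join "/" ((p :: q :: rest).take (k + 1 + 1)) =
              (cur ++ "/" ++ p) ++ "/" ++ PySem.Str.join "/" ((q :: rest).take (k + 1)) := by
            intro k
            rw [List.take_succ_cons]
            cases rest with
            | nil =>
                simp [pv_join_cons]
                rw [← String.toList_inj]; simp
            | cons r rs =>
                rw [List.take_succ_cons]
                rw [pv_join_cons]
                rw [← String.toList_inj]; simp
          have hmap : (List.range (q :: rest).length).map
                ((fun k => cur ++ "/" ++ PySem.Str.join "/" ((p :: q :: rest).take (k + 1))) ∘ Nat.succ) =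
              (List.range (q :: rest).length).map
                (fun k => (cur ++ "/" ++ p) ++ "/" ++ PySem.Str.join "/" ((q :: rest).take (k + 1))) := by
            refine List.map_congr_left (fun k _ => ?_)
            simp only [Function.comp_apply, Nat.succ_eq_add_one]
            exact htail k
          rw [hmap]
          rw [List.getLast_cons hl]
          rw [List.cons_append]
          rw [ih (cur ++ "/" ++ p) hl]
          rfl

theorem pv_B_port (parts : List String) (cur : String) (h : parts ≠ []) :
    (List.zip (PySem.List.slice parts none (some (-1)))
        ((PySem.List.pyRange 0 (parts.length : Int)).map
          (fun i => cur ++ "/" ++ PySem.Str.join "/" (PySem.List.slice parts none (some (i + 1)))))).map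
      (fun pu => [("title", pu.1), ("to", pu.2)]) ++
    [[("title", PySem.List.pyGetD parts (-1) "")]] = pvCrumbs parts cur := by
  rw [PySem.List.slice_to_neg_one, PySem.List.pyGetD_neg_one parts "" h]
  rw [PySem.List.pyRange_zero_nat, List.map_map]
  have hfun : (List.range parts.length).map
        ((fun i => cur ++ "/" ++ PySem.Str.join "/" (PySem.List.slice parts none (some (i + 1)))) ∘ (fun k : Nat => (k : Int))) =
      (List.range parts.length).map
        (fun k => cur ++ "/" ++ PySem.Str.join "/" (parts.take (k + 1))) := by
    refine List.map_congr_left (fun k _ => ?_)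
    simp only [Function.comp]
    have : ((k : Int) + 1) = ((k + 1 : Nat) : Int) := by push_cast; ring
    rw [this, PySem.List.slice_to_natCast]
  rw [hfun]
  exact pv_B parts cur h

-- ===== VERDICT (by name: the statement is the Claim_ definition above) =====
theorem generate_api_breadcrumbs_spec : Claim_equal_generate_api_breadcrumbs := by
  intro mp bu _
  unfold Spec_generate_api_breadcrumbs generate_api_breadcrumbs generate_api_breadcrumbs_alt
  dsimp only
  rw [pv_foldA ((PySem.Str.split? mp ".").getD []).length _ 0 [] bu (by simp)]
  rw [pv_B_port _ bu (pv_parts_ne_nil mp)]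
  simp
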